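-- pv_equiv track=rewrite | github.com/WSIZ-Bielsko/python-2025 | python_2025/zadania/easy_problem.py | easy_problem
-- ===== SOURCE A (Python) =====
-- def easy_problem(n: int) -> int:
--     solutions = 0
--     for b in range(1, 10000):
--         a = n - b
--         if a > 0:
--             solutions += 1
--         else:
--             return solutions
-- ===== SOURCE B (Python) =====
-- def easy_problem(n: int) -> int:
--     # closed form: count of b in 1..9999 with n - b > 0 and the loop not
--     # exited early is simply n - 1, floored at 0 (no iteration at all)
--     return max(0, n - 1)
-- ===== Notes on version B (the rewrite author's own statement) =====
-- stated objective: simpler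
-- what changed: Replaces the counting loop over range(1,10000) with the closed form max(0, n-1); no iteration.
-- outside the precondition, e.g. on easy_problem(10000): A returns None, B returns 9999
import Mathlib
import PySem

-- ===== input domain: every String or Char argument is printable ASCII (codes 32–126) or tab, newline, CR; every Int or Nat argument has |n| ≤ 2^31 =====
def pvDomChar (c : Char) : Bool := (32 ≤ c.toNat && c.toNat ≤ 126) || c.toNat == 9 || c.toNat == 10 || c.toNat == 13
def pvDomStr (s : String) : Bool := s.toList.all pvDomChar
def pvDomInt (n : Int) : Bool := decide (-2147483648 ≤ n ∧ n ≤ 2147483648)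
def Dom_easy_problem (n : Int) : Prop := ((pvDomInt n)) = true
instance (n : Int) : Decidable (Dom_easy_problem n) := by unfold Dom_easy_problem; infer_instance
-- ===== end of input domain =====

-- B replaces A's counting loop over range(1,10000) with the closed form max(0, n-1) (simpler, no iteration).


-- ===== PORT A =====
-- the loop 'for b in range(1, 10000): …' with an early return; 'none' = Python's
-- fall-off-the-end None (excluded by Pre_)
def pvLoopA_easy_problem (n : Int) : List Int → Int → Option Int
  | [], _ => none
  | b :: bs, solutions =>
      if n - b > 0 then pvLoopA_easy_problem n bs (solutions + 1)
      else some solutions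

def easy_problem (n : Int) : Int :=
  (pvLoopA_easy_problem n (PySem.List.pyRange 1 10000 1) 0).getD 0

-- ===== PORT B =====
def easy_problem_alt (n : Int) : Int := max 0 (n - 1)

-- ===== PRECONDITION & SPEC =====
-- Pre_ excludes n ≥ 10000, where A's loop exhausts range(1,10000) and falls off the
-- end returning None — not an int; B returns n-1 there.
def Pre_easy_problem (n : Int) : Prop := n ≤ 9999
instance (n : Int) : Decidable (Pre_easy_problem n) := by unfold Pre_easy_problem; infer_instance
def pvWitness_easy_problem : Int := (7)

def Spec_easy_problem (n : Int) (out : Int) : Prop := out = easy_problem_alt n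
instance (n : Int) (out : Int) : Decidable (Spec_easy_problem n out) := by unfold Spec_easy_problem; infer_instance

-- ===== CLAIM (what is proved, stated in full; the proofs are below) =====
def Claim_equal_easy_problem : Prop := ∀ (n : Int), Dom_easy_problem n → Pre_easy_problem n → Spec_easy_problem n (easy_problem n)

-- ===== LEMMAS AND PROOFS =====
-- loop characterisation: starting the scan at a (1 ≤ a ≤ 9999) with accumulator s,
-- the early return yields s + max 0 (n - a) whenever n ≤ 9999
lemma pvLoopA_eq (n : Int) (hn : n ≤ 9999) :
    ∀ (k : Nat) (a s : Int), (10000 - a).toNat = k → 1 ≤ a → a ≤ 9999 →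
      pvLoopA_easy_problem n (PySem.List.pyRange a 10000 1) s = some (s + max 0 (n - a)) := by
  intro k
  induction k with
  | zero => intro a s hk _ ha2; omega
  | succ k ih =>
      intro a s hk _ ha2
      rw [PySem.List.pyRange_one_cons (by omega : a < 10000)]
      simp only [pvLoopA_easy_problem]
      split_ifs with h
      · by_cases hb : a + 1 ≤ 9999
        · rw [ih (a + 1) (s + 1) (by omega) (by omega) hb]
          congr 1; omega
        · -- a = 9999 and n - a > 0 contradicts n ≤ 9999
          omega
      · congr 1; omega

lemma pvLoopA_top (n : Int) (hn : n ≤ 9999) :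
    easy_problem n = max 0 (n - 1) := by
  unfold easy_problem
  rw [pvLoopA_eq n hn ((10000:Int) - 1).toNat 1 0 rfl (by omega) (by omega)]
  simp

-- ===== VERDICT (by name: the statement is the Claim_ definition above) =====
theorem easy_problem_spec : Claim_equal_easy_problem := by
  intro n _ hpre
  unfold Spec_easy_problem easy_problem_alt
  exact pvLoopA_top n hpre
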